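-- pv_equiv track=rewrite | github.com/prinpice/Algorithm-Practice | SW Expert Academy/[swexpert]4522_세상의 모든 팰린드롬.py | palicol
-- ===== SOURCE A (Python) =====
-- def palicol(b):
--     if len(b) == 0 or len(b) == 1:
--         return True
--     else:
--         if b[0] == b[len(b)-1] or (b[0] == '?' or b[-1] == '?'):
--             dc = ""
--             for q in range(1, len(b)-1):
--                 dc += b[q]
--             return palicol(dc)
--         else:
--             return False
-- ===== SOURCE B (Python) =====
-- def palicol(b):
--     m = len(b) // 2
--     r = b[::-1]
--     return all(x == y or x == '?' or y == '?' for x, y in zip(b[:m], r[:m]))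
-- ===== Notes on version B (the rewrite author's own statement) =====
-- stated objective: faster
-- what changed: replaces the recursive strip-both-ends loop that rebuilds the middle string character by character at every level with a single pass comparing the first half against the reversed string elementwise (each position must match or be '?')
import Mathlib
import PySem

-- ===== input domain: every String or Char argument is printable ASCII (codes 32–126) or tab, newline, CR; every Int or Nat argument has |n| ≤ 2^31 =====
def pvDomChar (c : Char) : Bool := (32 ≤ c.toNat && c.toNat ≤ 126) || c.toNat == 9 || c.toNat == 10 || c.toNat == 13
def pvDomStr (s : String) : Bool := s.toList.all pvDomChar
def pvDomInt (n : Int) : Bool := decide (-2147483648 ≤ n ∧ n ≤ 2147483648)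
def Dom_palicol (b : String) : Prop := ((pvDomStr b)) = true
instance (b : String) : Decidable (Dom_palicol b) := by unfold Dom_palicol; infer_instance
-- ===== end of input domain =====

-- B replaces A's recursive strip-both-ends scheme (which rebuilds the middle string at every
-- level) with a single elementwise comparison of the first half against the reversed string.

-- ===== PORT A =====
-- termination helper for the port: the rebuilt middle string is shorter than the input
theorem pv_dc_len_lt (l : List Char) (h : ¬(l.length = 0 ∨ l.length = 1)) :
    ((PySem.List.pyRange 1 ((l.length : Int) - 1) 1).foldl
      (fun acc q => acc ++ [PySem.List.pyGetD l q ' ']) []).length < l.length := by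
  rw [PySem.List.foldl_append_singleton_eq_map]
  simp only [List.nil_append, List.length_map, PySem.List.length_pyRange_one]
  omega

-- A, transliterated on the character list: b[0], b[len(b)-1], b[-1] via pyGetD (all in range
-- here since len ≥ 2), and dc built by the same foldl over range(1, len(b)-1).
def palicolList (l : List Char) : Bool :=
  if _h : l.length = 0 ∨ l.length = 1 then true
  else
    if PySem.List.pyGetD l 0 ' ' = PySem.List.pyGetD l ((l.length : Int) - 1) ' '
        ∨ (PySem.List.pyGetD l 0 ' ' = '?' ∨ PySem.List.pyGetD l (-1) ' ' = '?') then
      palicolList ((PySem.List.pyRange 1 ((l.length : Int) - 1) 1).foldl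
        (fun acc q => acc ++ [PySem.List.pyGetD l q ' ']) [])
    else false
termination_by l.length
decreasing_by exact pv_dc_len_lt l _h

def palicol (b : String) : Bool := palicolList b.toList

-- ===== PORT B =====
def palicol_alt (b : String) : Bool :=
  let l := b.toList
  let m := l.length / 2
  let r := l.reverse               -- b[::-1]
  ((l.take m).zip (r.take m)).all (fun p => p.1 == p.2 || p.1 == '?' || p.2 == '?')

-- ===== PRECONDITION & SPEC =====
def Spec_palicol (b : String) (out : Bool) : Prop := out = palicol_alt b
instance (b : String) (out : Bool) : Decidable (Spec_palicol b out) := by unfold Spec_palicol; infer_instance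

-- ===== CLAIM (what is proved, stated in full; the proofs are below) =====
def Claim_equal_palicol : Prop := ∀ (b : String), Dom_palicol b → Spec_palicol b (palicol b)

-- ===== LEMMAS AND PROOFS =====

-- B's core, on the list
def altList (l : List Char) : Bool :=
  ((l.take (l.length / 2)).zip (l.reverse.take (l.length / 2))).all
    (fun p => p.1 == p.2 || p.1 == '?' || p.2 == '?')

-- first/last reads on a decomposed list
theorem pv_get0 (a z : Char) (s : List Char) :
    PySem.List.pyGetD (a :: (s ++ [z])) 0 ' ' = a := PySem.List.pyGetD_zero_cons a (s ++ [z]) ' '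

theorem pv_getlast (a z : Char) (s : List Char) :
    PySem.List.pyGetD (a :: (s ++ [z])) (((a :: (s ++ [z])).length : Int) - 1) ' ' = z := by
  have hlen : (a :: (s ++ [z])).length = s.length + 2 := by simp
  rw [hlen]
  rw [show ((s.length + 2 : Nat) : Int) - 1 = ((s.length + 1 : Nat) : Int) by push_cast; ring]
  rw [PySem.List.pyGetD_natCast]
  simp [List.getD]

theorem pv_getneg1 (a z : Char) (s : List Char) :
    PySem.List.pyGetD (a :: (s ++ [z])) (-1) ' ' = z := by
  rw [PySem.List.pyGetD_neg_one _ ' ' (by simp)]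
  simp

-- the dc loop builds exactly the middle of the list
theorem pv_dc_eq (a z : Char) (s : List Char) :
    ((PySem.List.pyRange 1 (((a :: (s ++ [z])).length : Int) - 1) 1).foldl
      (fun acc q => acc ++ [PySem.List.pyGetD (a :: (s ++ [z])) q ' ']) []) = s := by
  set l : List Char := a :: (s ++ [z]) with hl
  have hlen : l.length = s.length + 2 := by simp [hl]
  rw [PySem.List.foldl_append_singleton_eq_map]
  have hsplit := PySem.List.pyRange_one_succ_right
    (a := 1) (b := (l.length : Int) - 1) (by omega)
  rw [show ((l.length : Int) - 1) + 1 = (l.length : Int) by ring] at hsplit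
  have hdrop := PySem.List.map_pyGetD_pyRange l ' ' (a := 1) (by norm_num)
  rw [show PySem.List.len l = (l.length : Int) from rfl, hsplit, List.map_append] at hdrop
  have hlast : PySem.List.pyGetD l ((l.length : Int) - 1) ' ' = z := pv_getlast a z s
  have hdropv : l.drop (1 : Int).toNat = s ++ [z] := by simp [hl]
  rw [hdropv] at hdrop
  simp only [List.map_cons, List.map_nil, hlast] at hdrop
  rw [List.nil_append]
  exact List.append_cancel_right hdrop

-- B unfolds one layer on a decomposed list
theorem pv_alt_step (a z : Char) (s : List Char) :
    altList (a :: (s ++ [z]))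
      = (((a == z) || (a == '?') || (z == '?')) && altList s) := by
  unfold altList
  have hlen : (a :: (s ++ [z])).length = s.length + 2 := by simp
  have hm : (a :: (s ++ [z])).length / 2 = s.length / 2 + 1 := by omega
  have hrev : (a :: (s ++ [z])).reverse = z :: (s.reverse ++ [a]) := by simp
  rw [hm, hrev]
  have hm1 : s.length / 2 ≤ s.length := by omega
  have ht1 : (s ++ [z]).take (s.length / 2) = s.take (s.length / 2) := by
    rw [List.take_append_of_le_length hm1]
  have ht2 : (s.reverse ++ [a]).take (s.length / 2) = s.reverse.take (s.length / 2) := by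
    rw [List.take_append_of_le_length (by simp only [List.length_reverse]; exact hm1)]
  simp only [List.take_succ_cons, ht1, ht2, List.zip_cons_cons, List.all_cons]

-- the core equivalence, by strong induction on length
theorem pv_core (n : Nat) : ∀ l : List Char, l.length = n → palicolList l = altList l := by
  induction n using Nat.strong_induction_on with
  | _ n ih =>
    intro l hn
    by_cases h01 : l.length = 0 ∨ l.length = 1
    · rw [palicolList]
      rw [dif_pos h01]
      have hm : l.length / 2 = 0 := by omega
      unfold altList
      rw [hm]; simp
    · -- decompose l = a :: (s ++ [z])
      have hlen2 : 2 ≤ l.length := by omega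
      obtain ⟨a, t, rfl⟩ : ∃ a t, l = a :: t := by
        cases l with
        | nil => simp at hlen2
        | cons a t => exact ⟨a, t, rfl⟩
      have htne : t ≠ [] := by intro h; subst h; simp at hlen2
      obtain ⟨s, z, rfl⟩ : ∃ s z, t = s ++ [z] := ⟨t.dropLast, t.getLast htne, (List.dropLast_append_getLast htne).symm⟩
      rw [palicolList]
      rw [dif_neg h01]
      rw [pv_dc_eq, pv_get0, pv_getlast, pv_getneg1, pv_alt_step]
      have ihs : palicolList s = altList s := by
        have hslt : s.length < n := by
          have : (a :: (s ++ [z])).length = s.length + 2 := by simp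
          omega
        exact ih s.length hslt s rfl
      by_cases hc : a = z ∨ (a = '?' ∨ z = '?')
      · rw [if_pos hc, ihs]
        rcases hc with h | h | h <;> simp [h]
      · rw [if_neg hc]
        simp only [not_or] at hc
        obtain ⟨h1, h2, h3⟩ := hc
        simp [h1, h2, h3]

-- ===== VERDICT (by name: the statement is the Claim_ definition above) =====
theorem palicol_spec : Claim_equal_palicol := by
  intro b _
  unfold Spec_palicol palicol palicol_alt
  exact pv_core b.toList.length b.toList rfl
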